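-- pv_equiv track=rewrite | github.com/VCoca/Atoll | game/board.py | number_to_position
-- ===== SOURCE A (Python) =====
-- def number_to_position(number, board_size):
--         column_lengths = []
--
--         for i in range(board_size):
--             column_lengths.append(board_size + i)
--
--         for i in range(board_size - 2, -1, -1):
--             column_lengths.append(board_size + i)
--
--         remaining = number
--
--         j=1
--         for col in range(len(column_lengths)):
--             col_length = column_lengths[col]
--             if remaining < col_length:
--                 # col je X, row je Y
--                 # Pomeraj (offset) je ključan da bi matrica bila centrirana
--                 row_offset = max(0, col - (board_size - 1))
--                 row = remaining + row_offset
--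
--                 # Dodajemo +1 da bismo izbegli same ivice gde su koreni (0-ti red/kolona)
--                 # ali pazimo da ne preskočimo susedstvo
--                 return (row + 1, col + 1)
--             remaining -= col_length
--         return (-1, -1)
-- ===== SOURCE B (Python) =====
-- def number_to_position(number, board_size):
--     b = board_size
--     if b <= 0:
--         return (-1, -1)
--     ncols = 2 * b - 1
--
--     def prefix(c):
--         # number of cells in columns 0..c-1 (closed form of the two
--         # arithmetic segments b, b+1, ..., 2b-1, 2b-2, ..., b)
--         if c <= b:
--             return c * b + c * (c - 1) // 2
--         j = c - b
--         return b * b + b * (b - 1) // 2 + j * (2 * b - 2) - j * (j - 1) // 2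
--
--     if number >= prefix(ncols):
--         return (-1, -1)
--     # binary search for the largest col with prefix(col) <= number
--     lo, hi = 0, ncols - 1
--     while lo < hi:
--         mid = (lo + hi + 1) // 2
--         if prefix(mid) <= number:
--             lo = mid
--         else:
--             hi = mid - 1
--     col = lo
--     row = number - prefix(col) + max(0, col - (b - 1))
--     return (row + 1, col + 1)
-- ===== Notes on version B (the rewrite author's own statement) =====
-- stated objective: faster
-- what changed: A materialises the list of all 2*board_size-1 column lengths and scans it column by column subtracting each length; B computes the prefix sums of the two arithmetic length segments in closed form and binary-searches over them for the column, with no list built at all.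
import Mathlib
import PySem

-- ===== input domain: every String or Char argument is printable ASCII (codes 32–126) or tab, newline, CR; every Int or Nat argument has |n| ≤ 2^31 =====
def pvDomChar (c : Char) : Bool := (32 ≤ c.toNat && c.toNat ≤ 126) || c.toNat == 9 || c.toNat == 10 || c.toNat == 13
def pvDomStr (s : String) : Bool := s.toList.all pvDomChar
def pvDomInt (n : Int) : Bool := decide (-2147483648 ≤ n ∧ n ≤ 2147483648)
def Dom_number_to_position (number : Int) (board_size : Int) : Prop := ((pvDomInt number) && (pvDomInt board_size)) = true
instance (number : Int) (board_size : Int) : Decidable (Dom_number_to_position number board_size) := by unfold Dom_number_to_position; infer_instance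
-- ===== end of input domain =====

-- B replaces A's O(board_size) column-by-column scan of an explicitly built length list by a
-- closed-form prefix-sum formula plus an O(log board_size) binary search (objective: faster).
-- Both programs return the same pair for every input; B is proved equal to A everywhere.

-- ===== PORT A =====
-- A's 'for col in range(len(column_lengths))' loop with early return, walked structurally
-- over the list with the running column index and remaining counter (the dead 'j=1' is dropped).
def ntpLoop (cols : List Int) (col : Int) (remaining : Int) (b : Int) : List Int :=
  match cols with
  | [] => [-1, -1]
  | c :: rest =>
    if remaining < c then
      [remaining + max 0 (col - (b - 1)) + 1, col + 1]
    else ntpLoop rest (col + 1) (remaining - c) b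

def number_to_position (number : Int) (board_size : Int) : List Int :=
  let cl1 := (PySem.List.pyRange 0 board_size 1).map (fun i => board_size + i)
  let cl2 := (PySem.List.pyRange (board_size - 2) (-1) (-1)).map (fun i => board_size + i)
  ntpLoop (cl1 ++ cl2) 0 number board_size

-- ===== PORT B =====
-- Source B's prefix(c): number of cells in columns 0..c-1, in closed form.
def prefixB (b c : Int) : Int :=
  if c ≤ b then c * b + PySem.Int.floordiv (c * (c - 1)) 2
  else
    b * b + PySem.Int.floordiv (b * (b - 1)) 2
      + (c - b) * (2 * b - 2) - PySem.Int.floordiv ((c - b) * ((c - b) - 1)) 2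

-- Source B's 'while lo < hi' binary search; the loop runs at most (hi - lo).toNat times,
-- which is the fuel the caller supplies (each iteration strictly shrinks hi - lo).
def bsearchB (b number : Int) : Nat → Int → Int → Int
  | 0, lo, _ => lo
  | fuel + 1, lo, hi =>
    if lo < hi then
      let mid := PySem.Int.floordiv (lo + hi + 1) 2
      if prefixB b mid ≤ number then bsearchB b number fuel mid hi
      else bsearchB b number fuel lo (mid - 1)
    else lo

def number_to_position_alt (number : Int) (board_size : Int) : List Int :=
  let b := board_size
  if b ≤ 0 then [-1, -1]
  else
    let ncols := 2 * b - 1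
    if number ≥ prefixB b ncols then [-1, -1]
    else
      let col := bsearchB b number (ncols - 1).toNat 0 (ncols - 1)
      let row := number - prefixB b col + max 0 (col - (b - 1))
      [row + 1, col + 1]

-- ===== PRECONDITION & SPEC =====
def Spec_number_to_position (number : Int) (board_size : Int) (out : List Int) : Prop := out = number_to_position_alt number board_size
instance (number : Int) (board_size : Int) (out : List Int) : Decidable (Spec_number_to_position number board_size out) := by unfold Spec_number_to_position; infer_instance

-- ===== CLAIM (what is proved, stated in full; the proofs are below) =====
def Claim_equal_number_to_position : Prop := ∀ (number : Int) (board_size : Int), Dom_number_to_position number board_size → Spec_number_to_position number board_size (number_to_position number board_size)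

-- ===== LEMMAS AND PROOFS =====
def clen (b c : Int) : Int := if c < b then b + c else 3 * b - 2 - c

def colsList (b c : Int) : List Int :=
  (List.range (2 * b - 1 - c).toNat).map (fun k : Nat => clen b (c + (k : Int)))

lemma colsList_nil {b c : Int} (h : 2 * b - 1 ≤ c) : colsList b c = [] := by
  unfold colsList
  have : (2 * b - 1 - c).toNat = 0 := by omega
  simp [this]

lemma colsList_cons {b c : Int} (h : c < 2 * b - 1) :
    colsList b c = clen b c :: colsList b (c + 1) := by
  unfold colsList
  have h1 : (2 * b - 1 - c).toNat = (2 * b - 1 - (c + 1)).toNat + 1 := by omega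
  rw [h1, List.range_succ_eq_map, List.map_cons, List.map_map]
  simp only [Int.natCast_zero, add_zero]
  congr 1
  apply List.map_congr_left
  intro k _
  simp only [Function.comp]
  congr 1
  push_cast
  ring

lemma cols_eq {b : Int} (hb : 0 < b) :
    (PySem.List.pyRange 0 b 1).map (fun i => b + i)
      ++ (PySem.List.pyRange (b - 2) (-1) (-1)).map (fun i => b + i)
      = colsList b 0 := by
  rw [PySem.List.pyRange_one, PySem.List.pyRange_neg_one]
  simp only [sub_zero]
  unfold colsList
  have h1 : (2 * b - 1 - 0).toNat = b.toNat + ((b - 2) - (-1)).toNat := by omega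
  rw [h1, List.range_add, List.map_append, List.map_map, List.map_map, List.map_map]
  congr 1
  · apply List.map_congr_left
    intro k hk
    simp only [List.mem_range] at hk
    have : (k : Int) < b := by omega
    simp [Function.comp, clen, this]
  · apply List.map_congr_left
    intro k hk
    simp only [List.mem_range] at hk
    have h2 : ¬ ((0 : Int) + (b.toNat + k : Nat) < b) := by push_cast; omega
    simp only [Function.comp, clen, h2, if_false]
    push_cast
    omega

lemma fd2 (x : Int) : PySem.Int.floordiv x 2 = x / 2 :=
  PySem.Int.floordiv_eq_ediv_of_pos (by norm_num)

lemma prefix_succ {b c : Int} (hb : 0 < b) (h0 : 0 ≤ c) (h1 : c < 2 * b - 1) :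
    prefixB b (c + 1) = prefixB b c + clen b c := by
  unfold prefixB clen
  simp only [fd2]
  by_cases hcb : c + 1 ≤ b
  · have hc : c ≤ b := by omega
    have hlt : c < b := by omega
    rw [if_pos hcb, if_pos hc, if_pos hlt]
    have he : (c + 1) * ((c + 1) - 1) = c * (c - 1) + c * 2 := by ring
    rw [he, Int.add_mul_ediv_right _ _ (by norm_num : (2:Int) ≠ 0)]
    generalize c * (c - 1) / 2 = X
    ring
  · rw [if_neg hcb]
    have hnlt : ¬ (c < b) := by omega
    rw [if_neg hnlt]
    by_cases hcb2 : c ≤ b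
    · -- c = b
      have hc : c = b := by omega
      subst hc
      rw [if_pos le_rfl]
      have e1 : (c + 1 - c) = (1 : Int) := by ring
      rw [e1]
      norm_num
      omega
    · rw [if_neg hcb2]
      have he : (c + 1 - b) * ((c + 1 - b) - 1) = (c - b) * ((c - b) - 1) + (c - b) * 2 := by ring
      rw [he, Int.add_mul_ediv_right _ _ (by norm_num : (2:Int) ≠ 0)]
      generalize (c - b) * ((c - b) - 1) / 2 = X
      ring

lemma clen_pos {b c : Int} (hb : 0 < b) (h0 : 0 ≤ c) (h1 : c < 2 * b - 1) :
    1 ≤ clen b c := by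
  unfold clen; split_ifs <;> omega

lemma prefix_mono_aux {b : Int} (hb : 0 < b) :
    ∀ (k : Nat) (c : Int), 0 ≤ c → c + k ≤ 2 * b - 1 →
      prefixB b c ≤ prefixB b (c + k) := by
  intro k
  induction k with
  | zero => intro c _ _; simp
  | succ n ih =>
    intro c h0 h1
    have h2 : c + (n : Int) < 2 * b - 1 := by push_cast at h1 ⊢; omega
    have := prefix_succ hb (by omega : (0:Int) ≤ c + n) h2
    have hcl := clen_pos hb (by omega : (0:Int) ≤ c + n) h2
    have hih := ih c h0 (by push_cast at h1 ⊢; omega)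
    have he : c + ((n + 1 : Nat) : Int) = (c + n) + 1 := by push_cast; ring
    rw [he]
    omega

lemma prefix_mono {b c c' : Int} (hb : 0 < b) (h0 : 0 ≤ c) (h1 : c ≤ c')
    (h2 : c' ≤ 2 * b - 1) : prefixB b c ≤ prefixB b c' := by
  have he : c' = c + ((c' - c).toNat : Int) := by omega
  rw [he]
  exact prefix_mono_aux hb _ c h0 (by omega)

lemma prefix_zero {b : Int} (hb : 0 < b) : prefixB b 0 = 0 := by
  unfold prefixB
  rw [if_pos (by omega : (0:Int) ≤ b)]
  norm_num

lemma loop_none {b number : Int} (hb : 0 < b)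
    (hno : prefixB b (2 * b - 1) ≤ number) :
    ∀ (k : Nat) (c : Int), 0 ≤ c → c + k = 2 * b - 1 →
      ntpLoop (colsList b c) c (number - prefixB b c) b = [-1, -1] := by
  intro k
  induction k with
  | zero =>
    intro c _ h1
    rw [colsList_nil (by omega)]
    rfl
  | succ n ih =>
    intro c h0 h1
    push_cast at h1
    have hc : c < 2 * b - 1 := by omega
    rw [colsList_cons hc]
    unfold ntpLoop
    have hps := prefix_succ hb h0 hc
    have hmono := prefix_mono hb (by omega : (0:Int) ≤ c + 1) (by omega : c + 1 ≤ 2*b-1) le_rfl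
    rw [if_neg (by omega)]
    have he : number - prefixB b c - clen b c = number - prefixB b (c + 1) := by omega
    rw [he]
    exact ih (c + 1) (by omega) (by omega)

lemma bsearch_mid_lt {lo hi : Int} (h : lo < hi) :
    lo < PySem.Int.floordiv (lo + hi + 1) 2 ∧ PySem.Int.floordiv (lo + hi + 1) 2 ≤ hi := by
  have he : PySem.Int.floordiv (lo + hi + 1) 2 = (lo + hi + 1) / 2 :=
    PySem.Int.floordiv_eq_ediv_of_pos (by norm_num)
  rw [he]; omega

lemma bsearch_spec {b number : Int} :
    ∀ (fuel : Nat) (lo hi : Int), 0 ≤ lo → lo ≤ hi → (hi - lo).toNat ≤ fuel →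
      (prefixB b lo ≤ number ∨ lo = 0) → number < prefixB b (hi + 1) →
      lo ≤ bsearchB b number fuel lo hi ∧ bsearchB b number fuel lo hi ≤ hi ∧
      (prefixB b (bsearchB b number fuel lo hi) ≤ number ∨ bsearchB b number fuel lo hi = 0) ∧
      number < prefixB b (bsearchB b number fuel lo hi + 1) := by
  intro fuel
  induction fuel with
  | zero =>
    intro lo hi h0 h1 hf hinv hub
    have : lo = hi := by omega
    subst this
    unfold bsearchB
    exact ⟨le_rfl, le_rfl, hinv, hub⟩
  | succ n ih =>
    intro lo hi h0 h1 hf hinv hub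
    have heq : bsearchB b number (n + 1) lo hi =
        if lo < hi then
          (if prefixB b (PySem.Int.floordiv (lo + hi + 1) 2) ≤ number then
            bsearchB b number n (PySem.Int.floordiv (lo + hi + 1) 2) hi
          else bsearchB b number n lo (PySem.Int.floordiv (lo + hi + 1) 2 - 1))
        else lo := rfl
    by_cases hlt : lo < hi
    · rw [heq, if_pos hlt]
      have hm := bsearch_mid_lt hlt
      by_cases hp : prefixB b (PySem.Int.floordiv (lo + hi + 1) 2) ≤ number
      · rw [if_pos hp]
        have hr := ih _ hi (by omega) (by omega) (by omega) (Or.inl hp) hub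
        exact ⟨by have := hr.1; omega, hr.2.1, hr.2.2.1, hr.2.2.2⟩
      · rw [if_neg hp]
        have hr := ih lo (PySem.Int.floordiv (lo + hi + 1) 2 - 1) h0 (by omega) (by omega) hinv
          (by rw [sub_add_cancel]; omega)
        exact ⟨hr.1, by omega, hr.2.2.1, hr.2.2.2⟩
    · rw [heq, if_neg hlt]
      have : lo = hi := by omega
      subst this
      exact ⟨le_rfl, le_rfl, hinv, hub⟩

lemma loop_found {b number cs : Int} (hb : 0 < b) (hcs0 : 0 ≤ cs)
    (hcs1 : cs ≤ 2 * b - 2)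
    (hcs2 : prefixB b cs ≤ number ∨ cs = 0)
    (hcs3 : number < prefixB b (cs + 1)) :
    ∀ (k : Nat) (c : Int), 0 ≤ c → c + k = 2 * b - 1 → c ≤ cs →
      ntpLoop (colsList b c) c (number - prefixB b c) b
        = [number - prefixB b cs + max 0 (cs - (b - 1)) + 1, cs + 1] := by
  intro k
  induction k with
  | zero => intro c _ h1 h2; omega
  | succ n ih =>
    intro c h0 h1 h2
    push_cast at h1
    have hc : c < 2 * b - 1 := by omega
    rw [colsList_cons hc]
    unfold ntpLoop
    by_cases hce : c = cs
    · subst hce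
      have hps := prefix_succ hb h0 hc
      rw [if_pos (by omega)]
    · have hclt : c < cs := by omega
      have hps := prefix_succ hb h0 hc
      have hple : prefixB b (c + 1) ≤ prefixB b cs :=
        prefix_mono hb (by omega) (by omega) (by omega)
      have hcsle : prefixB b cs ≤ number := by
        rcases hcs2 with h | h
        · exact h
        · omega
      rw [if_neg (by omega)]
      have he : number - prefixB b c - clen b c = number - prefixB b (c + 1) := by omega
      rw [he]
      exact ih (c + 1) (by omega) (by omega) (by omega)

theorem main_eq (number b : Int) :
    number_to_position number b = number_to_position_alt number b := by
  by_cases hb : b ≤ 0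
  · unfold number_to_position number_to_position_alt
    rw [PySem.List.pyRange_one_eq_nil hb, PySem.List.pyRange_neg_one_eq_nil (by omega : b - 2 ≤ -1)]
    rw [if_pos hb]
    rfl
  · have hb' : 0 < b := by omega
    unfold number_to_position number_to_position_alt
    simp only []
    rw [if_neg hb, cols_eq hb']
    by_cases hno : number ≥ prefixB b (2 * b - 1)
    · rw [if_pos hno]
      have L := loop_none hb' hno (2 * b - 1).toNat 0 le_rfl (by omega)
      rw [prefix_zero hb', sub_zero] at L
      exact L
    · rw [if_neg hno]
      have he1 : 2 * b - 1 - 1 = 2 * b - 2 := by ring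
      rw [he1]
      have hs := bsearch_spec (b := b) (number := number) (2 * b - 2).toNat 0 (2 * b - 2)
        le_rfl (by omega) (by omega) (Or.inr rfl)
        (by rw [(by ring : 2 * b - 2 + 1 = 2 * b - 1)]; omega)
      have L := loop_found hb' (by omega) hs.2.1 hs.2.2.1 hs.2.2.2
        (2 * b - 1).toNat 0 le_rfl (by omega) (by omega)
      rw [prefix_zero hb', sub_zero] at L
      exact L

-- ===== VERDICT (by name: the statement is the Claim_ definition above) =====
theorem number_to_position_spec : Claim_equal_number_to_position := by
  intro number board_size _
  unfold Spec_number_to_position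
  exact main_eq number board_size
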